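-- pv_equiv track=rewrite | github.com/dbt-labs/jaffle-shop-classic | .dbtenv/Lib/site-packages/dbt/version.py | _format_core_msg
-- ===== SOURCE A (Python) =====
-- from typing import Iterator, List, Optional, Tuple
--
-- def _format_core_msg(lines: List[List[str]]) -> str:
--     msg = "Core:\n"
--     msg_lines = []
--
--     for name, version, update_msg in _pad_lines(lines, seperator=":"):
--         line_msg = f"  - {name} {version}"
--         if update_msg != "":
--             line_msg += f" - {update_msg}"
--         msg_lines.append(line_msg)
--
--     return msg + "\n".join(msg_lines)
--
-- def _pad_lines(lines: List[List[str]], seperator: str = "") -> List[List[str]]: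
--     if len(lines) == 0:
--         return []
--
--     # count the max line length for each column in the line
--     counter = [0] * len(lines[0])
--     for line in lines:
--         for i, item in enumerate(line):
--             counter[i] = max(counter[i], len(item))
--
--     result: List[List[str]] = []
--     for i, line in enumerate(lines):
--
--         # add another list to hold padded strings
--         if len(result) == i:
--             result.append([""] * len(line))
--
--         # iterate over columns in the line
--         for j, item in enumerate(line):
--
--             # the last column does not need padding
--             if j == len(line) - 1:
--                 result[i][j] = item
--                 continue
--
--             # if the following column has no length
--             # the string does not need padding
--             if counter[j + 1] == 0:
--                 result[i][j] = item
--                 continue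
--
--             # only add the seperator to the first column
--             offset = 0
--             if j == 0 and seperator != "":
--                 item += seperator
--                 offset = len(seperator)
--
--             result[i][j] = item.ljust(counter[j] + offset)
--
--     return result
-- ===== SOURCE B (Python) =====
-- def _format_core_msg(lines):
--     # column-wise: unzip into three columns, pad whole columns, zip back
--     if not lines:
--         return "Core:\n"
--     names, versions, updates = (list(c) for c in zip(*lines))
--     if any(versions):
--         width = max(map(len, names)) + 1
--         names = [(n + ":").ljust(width) for n in names]
--     if any(updates):
--         width = max(map(len, versions))
--         versions = [v.ljust(width) for v in versions]
--     rows = [f"  - {n} {v}" + (f" - {u}" if u else "")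
--             for n, v, u in zip(names, versions, updates)]
--     return "Core:\n" + "\n".join(rows)
-- ===== Notes on version B (the rewrite author's own statement) =====
-- stated objective: alternative
-- what changed: Replaces A's row-wise padded-table construction (index-mutated result[i][j] built row by row against a counter array) with a column-wise algorithm: unzip the rows into three column lists, conditionally pad each whole column at once (truthiness of any(column) decides whether to pad), and zip the columns back into lines.
import Mathlib
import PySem

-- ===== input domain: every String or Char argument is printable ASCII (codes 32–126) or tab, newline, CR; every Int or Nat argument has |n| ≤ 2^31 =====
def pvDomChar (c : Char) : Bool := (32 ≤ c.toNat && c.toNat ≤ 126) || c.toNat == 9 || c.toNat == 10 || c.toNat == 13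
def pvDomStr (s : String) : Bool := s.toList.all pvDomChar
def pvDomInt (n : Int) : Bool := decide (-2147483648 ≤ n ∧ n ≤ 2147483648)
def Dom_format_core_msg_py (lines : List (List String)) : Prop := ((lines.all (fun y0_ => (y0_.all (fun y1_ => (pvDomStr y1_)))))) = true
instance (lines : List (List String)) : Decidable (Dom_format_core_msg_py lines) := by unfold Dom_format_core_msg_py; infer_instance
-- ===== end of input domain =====

-- B replaces A's row-wise padded table (result[i][j] mutated against a counter array) with a
-- column-wise algorithm: unzip into three columns, pad each whole column at once, zip back.

-- ===== PORT A =====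
-- s.ljust(w): pad with spaces on the right to width w (unchanged if already that long); exact,
-- including Python's behaviour for nonpositive widths (toNat clamps to 0, as ljust does).
def pyLjust (s : String) (w : Int) : String :=
  s ++ String.ofList (List.replicate (w - PySem.Str.len s).toNat ' ')

-- result[i][j] = x  (indices in range on every input A accepts)
def pySet2 (res : List (List String)) (i j : Int) (x : String) : List (List String) :=
  PySem.List.pySetD res i (PySem.List.pySetD (PySem.List.pyGetD res i []) j x)

-- body of "for i, item in enumerate(line): counter[i] = max(counter[i], len(item))"
def padCounterStep (cnt : List Int) (line : List String) : List Int :=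
  (PySem.List.enumerate line).foldl (fun cnt p =>
    PySem.List.pySetD cnt p.1 (max (PySem.List.pyGetD cnt p.1 0) (PySem.Str.len p.2))) cnt

-- body of "for j, item in enumerate(line): …"
def padItemStep (counter : List Int) (sep : String) (i : Int) (line : List String)
    (res : List (List String)) (q : Int × String) : List (List String) :=
  let j := q.1
  let item := q.2
  if j == PySem.List.len line - 1 then
    pySet2 res i j item
  else if PySem.List.pyGetD counter (j + 1) 0 == 0 then
    pySet2 res i j item
  else
    let io : String × Int :=
      if j == 0 && !(sep == "") then (item ++ sep, PySem.Str.len sep) else (item, 0)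
    pySet2 res i j (pyLjust io.1 (PySem.List.pyGetD counter j 0 + io.2))

-- body of "for i, line in enumerate(lines): …"
def padLineStep (counter : List Int) (sep : String)
    (res : List (List String)) (p : Int × List String) : List (List String) :=
  let res := if PySem.List.len res == p.1 then res ++ [List.replicate p.2.length ""] else res
  (PySem.List.enumerate p.2).foldl (padItemStep counter sep p.1 p.2) res

-- _pad_lines, step for step
def pad_lines_py (lines : List (List String)) (sep : String) : List (List String) :=
  if lines.length = 0 then []
  else
    let counter : List Int :=
      lines.foldl padCounterStep (List.replicate (PySem.List.pyGetD lines 0 []).length 0)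
    (PySem.List.enumerate lines).foldl (padLineStep counter sep) []

-- body of "for name, version, update_msg in _pad_lines(…): …"
def coreLineStep (acc : List String) (row : List String) : List String :=
  match row with
  | [name, version, update_msg] =>  -- tuple unpacking; other shapes raise ValueError (outside Pre_)
    let lineMsg := "  - " ++ name ++ " " ++ version
    let lineMsg := if !(update_msg == "") then lineMsg ++ (" - " ++ update_msg) else lineMsg
    acc ++ [lineMsg]
  | _ => acc

def format_core_msg_py (lines : List (List String)) : String :=
  "Core:\n" ++ PySem.Str.join "\n" ((pad_lines_py lines ":").foldl coreLineStep [])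

-- ===== PORT B =====
-- zip(*lines) unpacked into three column lists (rows of another shape raise in Python: outside Pre_)
def colsOf : List (List String) → List String × List String × List String
  | [] => ([], [], [])
  | row :: t =>
    let c := colsOf t
    match row with
    | [n, v, u] => (n :: c.1, v :: c.2.1, u :: c.2.2)
    | _ => c

def format_core_msg_py_alt (lines : List (List String)) : String :=
  if lines.isEmpty then "Core:\n"
  else
    let c := colsOf lines
    let names := c.1
    let versions := c.2.1
    let updates := c.2.2
    let names :=
      if versions.any (fun v => !(v == "")) then       -- any(versions): truthiness = nonempty
        let w := (PySem.List.max? (names.map PySem.Str.len) (fun y => y)).getD 0 + 1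
        names.map (fun n => pyLjust (n ++ ":") w)
      else names
    let versions :=
      if updates.any (fun u => !(u == "")) then
        let w := (PySem.List.max? (versions.map PySem.Str.len) (fun y => y)).getD 0
        versions.map (fun v => pyLjust v w)
      else versions
    let rows := (names.zip (versions.zip updates)).map (fun p =>
      let lm := "  - " ++ p.1 ++ " " ++ p.2.1
      if !(p.2.2 == "") then lm ++ (" - " ++ p.2.2) else lm)
    "Core:\n" ++ PySem.Str.join "\n" rows

-- ===== PRECONDITION & SPEC =====
-- A raises (IndexError in _pad_lines or ValueError on tuple unpacking) unless every row has exactly 3 entries.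
def Pre_format_core_msg_py (lines : List (List String)) : Prop :=
  ∀ l ∈ lines, l.length = 3
instance (lines : List (List String)) : Decidable (Pre_format_core_msg_py lines) := by
  unfold Pre_format_core_msg_py; infer_instance
def pvWitness_format_core_msg_py : List (List String) :=
  [["installed", "1.0.0", "Up to date!"], ["registry", "1.0.1", ""]]

def Spec_format_core_msg_py (lines : List (List String)) (out : String) : Prop := out = format_core_msg_py_alt lines
instance (lines : List (List String)) (out : String) : Decidable (Spec_format_core_msg_py lines out) := by unfold Spec_format_core_msg_py; infer_instance

-- ===== CLAIM (what is proved, stated in full; the proofs are below) =====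
def Claim_equal_format_core_msg_py : Prop := ∀ (lines : List (List String)), Dom_format_core_msg_py lines → Pre_format_core_msg_py lines → Spec_format_core_msg_py lines (format_core_msg_py lines)

-- ===== LEMMAS AND PROOFS =====

-- running max of the lengths of a column (A's counter entry for that column)
def colMax (xs : List String) : Int := xs.foldl (fun a s => max a (PySem.Str.len s)) 0

-- the message line both programs produce for a raw row, given the three column maxima
def lineOf (c0 c1 c2 : Int) (n v u : String) : String :=
  let pn := if !(c1 == 0) then pyLjust (n ++ ":") (c0 + 1) else n
  let pv := if !(c2 == 0) then pyLjust v c1 else v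
  let lm := "  - " ++ pn ++ " " ++ pv
  if !(u == "") then lm ++ (" - " ++ u) else lm

-- the padded row A's table holds for a 3-entry line, with counter = [c0, c1, c2]
def rowPad (c0 c1 c2 : Int) (row : List String) : List String :=
  match row with
  | [n, v, u] =>
    [if c1 == 0 then n else pyLjust (n ++ ":") (c0 + 1),
     if c2 == 0 then v else pyLjust v c1,
     u]
  | _ => row

theorem strLen_nonneg (s : String) : 0 ≤ PySem.Str.len s := by
  simp [PySem.Str.len_eq]

theorem strLen_eq_zero (s : String) : PySem.Str.len s = 0 ↔ s = "" := by
  rw [PySem.Str.len_eq]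
  constructor
  · intro h
    have h0 : s.toList = [] := List.eq_nil_of_length_eq_zero (by exact_mod_cast h)
    have := congrArg String.ofList h0
    simpa using this
  · intro h; subst h; rfl

-- hoisting the start value out of the running-max fold
theorem foldl_max_hoist (xs : List String) : ∀ a : Int, 0 ≤ a →
    xs.foldl (fun b s => max b (PySem.Str.len s)) a = max a (colMax xs) := by
  induction xs with
  | nil => intro a ha; simp [colMax]; omega
  | cons x t ih =>
    intro a ha
    have h1 := ih (max a (PySem.Str.len x)) (le_max_of_le_left ha)
    have h2 := ih (max 0 (PySem.Str.len x)) (le_max_left _ _)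
    simp only [colMax, List.foldl_cons] at *
    rw [h1, h2]
    omega

theorem colMax_cons (x : String) (t : List String) :
    colMax (x :: t) = max (PySem.Str.len x) (colMax t) := by
  have h := foldl_max_hoist t (max 0 (PySem.Str.len x)) (le_max_left _ _)
  simp only [colMax, List.foldl_cons] at *
  rw [h]
  have := strLen_nonneg x
  omega

theorem colMax_nonneg (xs : List String) : 0 ≤ colMax xs := by
  induction xs with
  | nil => simp [colMax]
  | cons x t ih => rw [colMax_cons]; exact le_max_of_le_right ih

-- colMax = 0 exactly when the column has no nonempty entry (truthiness of any(column))
theorem colMax_zero_iff (xs : List String) :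
    (colMax xs = 0) ↔ (xs.any (fun s => !(s == "")) = false) := by
  induction xs with
  | nil => simp [colMax]
  | cons x t ih =>
    rw [colMax_cons, List.any_cons]
    have hx := strLen_nonneg x
    have ht := colMax_nonneg t
    constructor
    · intro h
      have h1 : PySem.Str.len x = 0 := by omega
      have h2 : colMax t = 0 := by omega
      simp [ih.mp h2, (strLen_eq_zero x).mp h1]
    · intro h
      simp only [Bool.or_eq_false_iff] at h
      have hx0 : x = "" := by
        by_contra hne
        simp [hne] at h
      have : PySem.Str.len x = 0 := (strLen_eq_zero x).mpr hx0
      have : colMax t = 0 := ih.mpr h.2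
      omega

-- Python's max(map(len, col)) for a nonempty column is colMax
theorem max_len_col (x : String) (t : List String) :
    (PySem.List.max? ((x :: t).map PySem.Str.len) (fun y => y)).getD 0 = colMax (x :: t) := by
  rw [List.map_cons, PySem.List.max?_id_cons]
  have h := foldl_max_hoist t (PySem.Str.len x) (strLen_nonneg x)
  rw [colMax_cons]
  simp only [Option.getD_some]
  rw [List.foldl_map, h]

-- A's counter fold over all-3-entry rows computes the three column maxima of colsOf
theorem cnt_cols (lines : List (List String)) (h : ∀ l ∈ lines, l.length = 3) :
    ∀ a b c : Int,
      lines.foldl padCounterStep [a, b, c] =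
        [(colsOf lines).1.foldl (fun w s => max w (PySem.Str.len s)) a,
         (colsOf lines).2.1.foldl (fun w s => max w (PySem.Str.len s)) b,
         (colsOf lines).2.2.foldl (fun w s => max w (PySem.Str.len s)) c] := by
  induction lines with
  | nil => intro a b c; rfl
  | cons l t ih =>
    intro a b c
    obtain ⟨n, v, u, rfl⟩ := List.length_eq_three.mp (h l (by simp))
    have hstep : padCounterStep [a, b, c] [n, v, u] =
        [max a (PySem.Str.len n), max b (PySem.Str.len v), max c (PySem.Str.len u)] := by
      simp [padCounterStep, PySem.List.enumerate, PySem.List.pySetD, PySem.List.pySet?,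
            PySem.List.pyGetD, PySem.List.pyIdx?, PySem.List.pyGet?]
    rw [List.foldl_cons, hstep, ih (fun x hx => h x (by simp [hx]))]
    simp [colsOf]

-- result[i][j] = x on the freshly appended row is list surgery on the last row
theorem pySet2_last (res : List (List String)) (row : List String) (j : Int) (x : String)
    (hj : 0 ≤ j) :
    pySet2 (res ++ [row]) (↑res.length) j x = res ++ [PySem.List.pySetD row j x] := by
  simp [pySet2, PySem.List.pySetD_of_nonneg _ _ hj, PySem.List.pyGetD_natCast,
    PySem.List.pySetD_natCast, List.set_append_right, List.getD]

theorem pySet2_last₀ (res : List (List String)) (row : List String) (x : String) :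
    pySet2 (res ++ [row]) (↑res.length) 0 x = res ++ [PySem.List.pySetD row 0 x] :=
  pySet2_last res row 0 x (by norm_num)
theorem pySet2_last₁ (res : List (List String)) (row : List String) (x : String) :
    pySet2 (res ++ [row]) (↑res.length) 1 x = res ++ [PySem.List.pySetD row 1 x] :=
  pySet2_last res row 1 x (by norm_num)
theorem pySet2_last₂ (res : List (List String)) (row : List String) (x : String) :
    pySet2 (res ++ [row]) (↑res.length) 2 x = res ++ [PySem.List.pySetD row 2 x] :=
  pySet2_last res row 2 x (by norm_num)

-- one iteration of A's outer padding loop appends the padded row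
theorem padLine_builds (c0 c1 c2 : Int) (res : List (List String)) (n v u : String) :
    padLineStep [c0, c1, c2] ":" res ((res.length : Int), [n, v, u]) =
      res ++ [rowPad c0 c1 c2 [n, v, u]] := by
  by_cases h1 : c1 = 0 <;> by_cases h2 : c2 = 0 <;>
    simp [padLineStep, padItemStep, rowPad, PySem.List.len_eq, PySem.List.enumerate,
      pySet2_last₀, pySet2_last₁, pySet2_last₂,
      PySem.List.pyGetD_ofNat', PySem.List.pySetD, PySem.List.pySet?, PySem.List.pyIdx?,
      List.set, h1, h2]

-- A's whole result loop is a map of rowPad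
theorem pad_rows (c0 c1 c2 : Int) :
    ∀ (rest : List (List String)) (res : List (List String)),
      (∀ l ∈ rest, l.length = 3) →
      (PySem.List.enumerate rest (res.length : Int)).foldl (padLineStep [c0, c1, c2] ":") res
        = res ++ rest.map (rowPad c0 c1 c2) := by
  intro rest
  induction rest with
  | nil => intro res h; simp [PySem.List.enumerate]
  | cons l t ih =>
    intro res h
    obtain ⟨n, v, u, rfl⟩ := List.length_eq_three.mp (h l (by simp))
    rw [PySem.List.enumerate_cons, List.foldl_cons, padLine_builds]
    have hlen : ((res.length : Int) + 1) = (((res ++ [rowPad c0 c1 c2 [n, v, u]]).length : Int)) := by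
      simp
    rw [hlen, ih _ (fun x hx => h x (by simp [hx]))]
    simp

-- A's message loop over the padded rows yields the lineOf map
theorem msg_eq (c0 c1 c2 : Int) :
    ∀ (lines : List (List String)) (acc : List String), (∀ l ∈ lines, l.length = 3) →
      (lines.map (rowPad c0 c1 c2)).foldl coreLineStep acc
        = acc ++ lines.map (fun r => match r with
            | [n, v, u] => lineOf c0 c1 c2 n v u
            | _ => "") := by
  intro lines
  induction lines with
  | nil => intro acc h; simp
  | cons l t ih =>
    intro acc h
    obtain ⟨n, v, u, rfl⟩ := List.length_eq_three.mp (h l (by simp))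
    have hstep : coreLineStep acc (rowPad c0 c1 c2 [n, v, u]) =
        acc ++ [lineOf c0 c1 c2 n v u] := by
      by_cases h1 : c1 = 0 <;> by_cases h2 : c2 = 0 <;>
        simp [rowPad, coreLineStep, lineOf, h1, h2]
    rw [List.map_cons, List.foldl_cons, hstep, ih _ (fun x hx => h x (by simp [hx]))]
    simp

-- a conditional whole-column map is a per-element conditional map
theorem if_map (b : Bool) (f : String → String) (xs : List String) :
    (if b then xs.map f else xs) = xs.map (fun x => if b then f x else x) := by
  cases b <;> simp

-- B's zipped, column-mapped rows are a single map over the raw lines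
theorem zip3_map (f g : String → String) (G : String × String × String → String) :
    ∀ (lines : List (List String)), (∀ l ∈ lines, l.length = 3) →
      (((colsOf lines).1.map f).zip (((colsOf lines).2.1.map g).zip (colsOf lines).2.2)).map G
        = lines.map (fun r => match r with
            | [n, v, u] => G (f n, g v, u)
            | _ => "") := by
  intro lines
  induction lines with
  | nil => intro _; simp [colsOf]
  | cons l t ih =>
    intro h
    obtain ⟨n, v, u, rfl⟩ := List.length_eq_three.mp (h l (by simp))
    have ht := ih (fun x hx => h x (by simp [hx]))
    simp only [colsOf, List.map_cons, List.zip_cons_cons]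
    rw [ht]

-- ===== VERDICT (by name: the statement is the Claim_ definition above) =====
theorem format_core_msg_py_spec : Claim_equal_format_core_msg_py := by
  intro lines _ hpre
  unfold Spec_format_core_msg_py
  match lines, hpre with
  | [], _ => rfl
  | l :: t, hpre =>
    obtain ⟨n, v, u, rfl⟩ := List.length_eq_three.mp (hpre l (by simp))
    have hinit : List.replicate (PySem.List.pyGetD ([n, v, u] :: t) 0 []).length (0 : Int)
        = [(0 : Int), 0, 0] := by
      simp [PySem.List.pyGetD_ofNat', List.replicate]
    have hcols : colsOf ([n, v, u] :: t)
        = (n :: (colsOf t).1, v :: (colsOf t).2.1, u :: (colsOf t).2.2) := by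
      simp [colsOf]
    set c0 := colMax (colsOf ([n, v, u] :: t)).1 with hc0def
    set c1 := colMax (colsOf ([n, v, u] :: t)).2.1 with hc1def
    set c2 := colMax (colsOf ([n, v, u] :: t)).2.2 with hc2def
    have hcnt' : ([n, v, u] :: t).foldl padCounterStep [0, 0, 0] = [c0, c1, c2] :=
      cnt_cols ([n, v, u] :: t) hpre 0 0 0
    -- A's side: Core + join of the lineOf map
    have hA : format_core_msg_py ([n, v, u] :: t)
        = "Core:\n" ++ PySem.Str.join "\n"
            (([n, v, u] :: t).map (fun r => match r with
              | [n, v, u] => lineOf c0 c1 c2 n v u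
              | _ => "")) := by
      simp only [format_core_msg_py, pad_lines_py, hinit]
      rw [if_neg (by simp), hcnt']
      rw [show (0 : Int) = ((([] : List (List String)).length : Int)) from rfl]
      rw [pad_rows _ _ _ _ _ hpre, List.nil_append, msg_eq _ _ _ _ _ hpre, List.nil_append]
    -- B's side: any(column) is the negation of "column max is zero"
    have hany1 : ((colsOf ([n, v, u] :: t)).2.1.any (fun s => !(s == ""))) = !(c1 == 0) := by
      cases hb : ((colsOf ([n, v, u] :: t)).2.1.any (fun s => !(s == ""))) with
      | false => have h0 : c1 = 0 := (colMax_zero_iff _).mpr hb; simp [h0]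
      | true =>
        have h0 : ¬ c1 = 0 := fun hz => by
          rw [(colMax_zero_iff _).mp hz] at hb; exact Bool.false_ne_true hb
        simp [h0]
    have hany2 : ((colsOf ([n, v, u] :: t)).2.2.any (fun s => !(s == ""))) = !(c2 == 0) := by
      cases hb : ((colsOf ([n, v, u] :: t)).2.2.any (fun s => !(s == ""))) with
      | false => have h0 : c2 = 0 := (colMax_zero_iff _).mpr hb; simp [h0]
      | true =>
        have h0 : ¬ c2 = 0 := fun hz => by
          rw [(colMax_zero_iff _).mp hz] at hb; exact Bool.false_ne_true hb
        simp [h0]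
    have hmax0 : (PySem.List.max? ((colsOf ([n, v, u] :: t)).1.map PySem.Str.len) (fun y => y)).getD 0 = c0 := by
      rw [hc0def, hcols]; exact max_len_col n (colsOf t).1
    have hmax1 : (PySem.List.max? ((colsOf ([n, v, u] :: t)).2.1.map PySem.Str.len) (fun y => y)).getD 0 = c1 := by
      rw [hc1def, hcols]; exact max_len_col v (colsOf t).2.1
    have hB : format_core_msg_py_alt ([n, v, u] :: t)
        = "Core:\n" ++ PySem.Str.join "\n"
            (([n, v, u] :: t).map (fun r => match r with
              | [n, v, u] => lineOf c0 c1 c2 n v u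
              | _ => "")) := by
      simp only [format_core_msg_py_alt, List.isEmpty_cons, Bool.false_eq_true, if_false,
        hany1, hany2, hmax0, hmax1]
      congr 1
      rw [if_map, if_map,
        zip3_map (fun n => if !(c1 == 0) then pyLjust (n ++ ":") (c0 + 1) else n)
                 (fun v => if !(c2 == 0) then pyLjust v c1 else v)
                 _ ([n, v, u] :: t) hpre]
      simp only [lineOf]
    rw [hA, hB]
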